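-- pv_equiv track=rewrite | github.com/dahukjac17/Hangman | hangman.py | guessResult
-- ===== SOURCE A (Python) =====
-- def guessResult(word,spaces,guess):
-- 	if spaces == []:
-- 		return False
-- 	elif word[spaces[0]-1] == guess:
-- 		return True
-- 	else:
-- 		spaces.pop(0)
-- 		return guessResult(word,spaces,guess)
-- ===== SOURCE B (Python) =====
-- def guessResult(word, spaces, guess):
--     # Return-value re-implementation: does guess match word at any listed position?
--     # Note: unlike A, this does not mutate `spaces` (A pops its misses off the front).
--     return any(word[i - 1] == guess for i in spaces)
-- ===== Notes on version B (the rewrite author's own statement) =====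
-- stated objective: idiomatic
-- what changed: Replaces the self-recursion that pops misses off the list one by one with a single non-mutating any() over a generator; the return value is identical, the O(n^2) pop(0) churn and the recursion-depth limit disappear.
import Mathlib
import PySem

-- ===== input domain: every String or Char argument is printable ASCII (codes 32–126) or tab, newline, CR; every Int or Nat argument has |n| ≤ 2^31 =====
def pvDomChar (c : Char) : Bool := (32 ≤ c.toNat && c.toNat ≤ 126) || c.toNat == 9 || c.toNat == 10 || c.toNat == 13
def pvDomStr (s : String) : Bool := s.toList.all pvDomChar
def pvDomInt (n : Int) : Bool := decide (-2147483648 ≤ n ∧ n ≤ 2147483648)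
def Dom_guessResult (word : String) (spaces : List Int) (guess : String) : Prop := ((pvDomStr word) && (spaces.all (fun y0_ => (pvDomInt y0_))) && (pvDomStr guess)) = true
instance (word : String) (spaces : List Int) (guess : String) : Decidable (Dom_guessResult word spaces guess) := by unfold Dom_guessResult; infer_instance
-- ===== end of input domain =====

-- B replaces A's pop-and-recurse with a single non-mutating any(); return-value
-- equivalence only: A pops its misses off the front of `spaces`, B leaves it untouched.

-- ===== PORT A =====
-- literal port of A's recursion; the `none` branch is Python's IndexError (excluded by Pre_)
def guessResult (word : String) (spaces : List Int) (guess : String) : Bool :=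
  match spaces with
  | [] => false
  | i :: rest =>
    match PySem.Str.pyGet? word (i - 1) with
    | none => false            -- IndexError in Python; outside Pre_guessResult
    | some c => if String.ofList [c] == guess then true else guessResult word rest guess

-- ===== PORT B =====
-- word[i-1] == guess for one position i (none = IndexError, compared as false; outside Pre_)
def hitB (word guess : String) (i : Int) : Bool :=
  (PySem.Str.pyGet? word (i - 1)).map (fun c => String.ofList [c]) == some guess

def guessResult_alt (word : String) (spaces : List Int) (guess : String) : Bool :=
  spaces.any (hitB word guess)

-- ===== PRECONDITION & SPEC =====
-- Pre_ admits exactly the inputs on which the Python A returns (both Pythons raise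
-- IndexError on the same inputs): either every listed index is in range, or some
-- in-range matching position occurs before the first out-of-range index.
def Pre_guessResult (word : String) (spaces : List Int) (guess : String) : Prop :=
  (∀ i ∈ spaces, (PySem.Str.pyGet? word (i - 1)).isSome = true) ∨
  (∃ k < spaces.length, hitB word guess (spaces.getD k 0) = true ∧
     ∀ j < k, (PySem.Str.pyGet? word (spaces.getD j 0 - 1)).isSome = true)
instance (word : String) (spaces : List Int) (guess : String) : Decidable (Pre_guessResult word spaces guess) := by unfold Pre_guessResult; infer_instance

def pvWitness_guessResult : String × List Int × String := ("abc", [1, 3], "c")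

def Spec_guessResult (word : String) (spaces : List Int) (guess : String) (out : Bool) : Prop := out = guessResult_alt word spaces guess
instance (word : String) (spaces : List Int) (guess : String) (out : Bool) : Decidable (Spec_guessResult word spaces guess out) := by unfold Spec_guessResult; infer_instance

-- ===== CLAIM (what is proved, stated in full; the proofs are below) =====
def Claim_equal_guessResult : Prop := ∀ (word : String) (spaces : List Int) (guess : String), Dom_guessResult word spaces guess → Pre_guessResult word spaces guess → Spec_guessResult word spaces guess (guessResult word spaces guess)

-- ===== LEMMAS AND PROOFS =====

theorem guessResult_eq_any (word guess : String) :
    ∀ spaces : List Int, Pre_guessResult word spaces guess →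
      guessResult word spaces guess = (spaces.any (hitB word guess)) := by
  intro spaces
  induction spaces with
  | nil => intro _; rfl
  | cons i rest ih =>
    intro hpre
    simp only [guessResult, List.any_cons]
    cases hg : PySem.Str.pyGet? word (i - 1) with
    | none =>
      exfalso
      rcases hpre with h | ⟨k, hk, hhit, hpref⟩
      · have hi := h i (by simp)
        rw [hg] at hi
        simp at hi
      · cases k with
        | zero =>
          simp only [List.getD_cons_zero] at hhit
          unfold hitB at hhit
          rw [hg] at hhit
          simp at hhit
        | succ k' =>
          have h0 := hpref 0 (Nat.succ_pos _)
          simp only [List.getD_cons_zero] at h0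
          rw [hg] at h0
          simp at h0
    | some c =>
      by_cases hc : (String.ofList [c] == guess) = true
      · have hh : hitB word guess i = true := by
          unfold hitB; rw [hg]; simpa using hc
        simp [hc, hh]
      · have hhi : hitB word guess i = false := by
          unfold hitB; rw [hg]
          simpa using (by simpa using hc : ¬ String.ofList [c] = guess)
        simp only [if_neg hc, hhi, Bool.false_or]
        apply ih
        rcases hpre with h | ⟨k, hk, hhit, hpref⟩
        · exact Or.inl (fun j hj => h j (List.mem_cons_of_mem _ hj))
        · cases k with
          | zero =>
            simp only [List.getD_cons_zero] at hhit
            rw [hhit] at hhi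
            simp at hhi
          | succ k' =>
            refine Or.inr ⟨k', by simpa using hk, by simpa using hhit, ?_⟩
            intro j hj
            have hj1 := hpref (j + 1) (by omega)
            simpa using hj1

-- ===== VERDICT (by name: the statement is the Claim_ definition above) =====
theorem guessResult_spec : Claim_equal_guessResult := by
  intro word spaces guess _ hpre
  unfold Spec_guessResult guessResult_alt
  exact guessResult_eq_any word guess spaces hpre
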